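-- pv_equiv track=rewrite | github.com/Aphtasik/Epita-S3-OCR | Python/ImageEtPretraitement.py | horizontalProjection
-- ===== SOURCE A (Python) =====
-- def horizontalProjection(M):
--     """
--     Cette fonction prend une matrice M et realise une projection horizontale des 1 sur la gauche
--     Elle sépare la matrice en sous matrice qui correspondent aux lignes
--     Ne pas utiliser si l'image/matrice n'a pas été traité
--     M : Matrice binarizé et traité
--     return : matrice correspondant au projeté horizontale de M
--     """
--     lM = len(M)
--     cM = len(M[0])
--
--     #Construction de la matrice projection à la bonne taille
--     listOfZero = [0 for i in range(cM)]
--     projectionM = []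
--     for i in range(lM):
--         L = listOfZero[:]
--         projectionM.append(L)
--
--     #projection horizontale
--     for i in range(lM):
--         indexOfOne = 0
--         for j in range(cM):
--             if M[i][j] == 1:
--                 projectionM[i][indexOfOne] = 1
--                 indexOfOne += 1
--
--     return projectionM
-- ===== SOURCE B (Python) =====
-- def horizontalProjection(M):
--     """Left-justify the 1s of each row into a width-len(M[0]) row: count the 1s
--     in the row's first `width` entries and rebuild the output row directly."""
--     width = len(M[0])
--     result = []
--     for row in M:
--         c = row[:width].count(1)
--         result.append([1] * c + [0] * (width - c))
--     return result
-- ===== Notes on version B (the rewrite author's own statement) =====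
-- stated objective: simpler
-- what changed: B drops A's pre-built zero matrix and the index-pointer mutation pass: for each row it counts the 1s in the first len(M[0]) entries and constructs [1]*c + [0]*(width-c) directly.
import Mathlib
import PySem

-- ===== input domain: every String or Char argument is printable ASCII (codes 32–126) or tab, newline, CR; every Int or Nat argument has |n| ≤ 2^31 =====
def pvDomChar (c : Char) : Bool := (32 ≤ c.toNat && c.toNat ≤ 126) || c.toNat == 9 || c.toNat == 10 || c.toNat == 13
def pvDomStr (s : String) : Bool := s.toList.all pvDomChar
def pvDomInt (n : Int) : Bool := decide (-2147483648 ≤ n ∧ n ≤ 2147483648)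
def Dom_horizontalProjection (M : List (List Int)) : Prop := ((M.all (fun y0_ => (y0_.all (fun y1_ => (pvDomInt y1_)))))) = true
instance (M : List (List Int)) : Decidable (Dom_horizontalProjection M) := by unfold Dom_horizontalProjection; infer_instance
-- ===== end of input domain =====

-- B replaces A's pre-built zero matrix and index-pointer mutation with one count-and-construct pass per row (objective: simpler).

-- ===== PORT A =====
def horizontalProjection (M : List (List Int)) : List (List Int) :=
  let lM : Int := M.length
  let cM : Int := (PySem.List.pyGetD M 0 []).length
  let listOfZero : List Int := (PySem.List.pyRange 0 cM 1).map (fun _ => (0 : Int))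
  let projectionM : List (List Int) :=
    (PySem.List.pyRange 0 lM 1).foldl
      (fun acc _ => acc ++ [PySem.List.slice listOfZero none none]) []
  (PySem.List.pyRange 0 lM 1).foldl (fun proj i =>
    ((PySem.List.pyRange 0 cM 1).foldl (fun (st : List (List Int) × Int) j =>
        if PySem.List.pyGetD (PySem.List.pyGetD M i []) j 0 = 1 then
          (PySem.List.pySetD st.1 i
             (PySem.List.pySetD (PySem.List.pyGetD st.1 i []) st.2 1), st.2 + 1)
        else st)
      (proj, 0)).1) projectionM

-- ===== PORT B =====
def horizontalProjection_alt (M : List (List Int)) : List (List Int) :=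
  let width : Int := (PySem.List.pyGetD M 0 []).length
  M.foldl (fun result row =>
    let c : Int := PySem.List.count (PySem.List.slice row none (some width)) 1
    result ++ [PySem.List.pyRepeat [(1 : Int)] c ++
               PySem.List.pyRepeat [(0 : Int)] (width - c)]) []

-- ===== PRECONDITION & SPEC =====
-- Pre_ excludes exactly the inputs on which A raises IndexError: the empty matrix
-- (len(M[0]) fails) and matrices with a row shorter than the first row (M[i][j] fails).
def Pre_horizontalProjection (M : List (List Int)) : Prop :=
  M ≠ [] ∧ ∀ r ∈ M, (M.headD []).length ≤ r.length
instance (M : List (List Int)) : Decidable (Pre_horizontalProjection M) := by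
  unfold Pre_horizontalProjection; infer_instance

def pvWitness_horizontalProjection : List (List Int) := [[0, 1, 0], [1, 1, 0], [2, 0, 1]]

def Spec_horizontalProjection (M : List (List Int)) (out : List (List Int)) : Prop :=
  out = horizontalProjection_alt M
instance (M : List (List Int)) (out : List (List Int)) : Decidable (Spec_horizontalProjection M out) := by
  unfold Spec_horizontalProjection; infer_instance

-- ===== CLAIM (what is proved, stated in full; the proofs are below) =====
def Claim_equal_horizontalProjection : Prop :=
  ∀ (M : List (List Int)), Dom_horizontalProjection M → Pre_horizontalProjection M →
    Spec_horizontalProjection M (horizontalProjection M)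

-- ===== LEMMAS AND PROOFS =====

-- A's inner loop, viewed on a single row: place a 1 at the running pointer when the scanned
-- element is 1.
def rstep (st : List Int × Int) (x : Int) : List Int × Int :=
  if x = 1 then (PySem.List.pySetD st.1 st.2 1, st.2 + 1) else st

-- A's inner loop at matrix level: row i of the projection matrix is mutated in place.
def mstep (row : List Int) (i : Int) (st : List (List Int) × Int) (j : Int) : List (List Int) × Int :=
  if PySem.List.pyGetD row j 0 = 1 then
    (PySem.List.pySetD st.1 i (PySem.List.pySetD (PySem.List.pyGetD st.1 i []) st.2 1), st.2 + 1)
  else st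

-- A's inner loop on the extracted row, still indexed by j.
def jstep (row : List Int) (st : List Int × Int) (j : Int) : List Int × Int :=
  if PySem.List.pyGetD row j 0 = 1 then (PySem.List.pySetD st.1 st.2 1, st.2 + 1) else st

-- Scanning r while writing 1s at the pointer turns (1^a ++ 0^b) into (1^(a+c) ++ 0^(b-c)).
theorem hp_inner (r : List Int) : ∀ (a b : Nat), List.count 1 r ≤ b →
    r.foldl rstep (List.replicate a 1 ++ List.replicate b 0, (a : Int))
    = (List.replicate (a + List.count 1 r) 1 ++ List.replicate (b - List.count 1 r) 0,
       ((a + List.count 1 r : Nat) : Int)) := by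
  induction r with
  | nil => intro a b _; simp
  | cons x r ih =>
    intro a b hc
    by_cases hx : x = 1
    · subst hx
      rw [List.count_cons_self] at hc ⊢
      obtain ⟨b', rfl⟩ : ∃ b', b = b' + 1 := ⟨b - 1, by omega⟩
      have hset : (List.replicate a (1:Int) ++ List.replicate (b'+1) 0).set a 1
          = List.replicate (a+1) 1 ++ List.replicate b' 0 := by
        rw [show List.replicate (b'+1) (0:Int) = 0 :: List.replicate b' 0 from List.replicate_succ,
            List.set_append]
        simp [List.replicate_succ']
      have step : rstep (List.replicate a (1:Int) ++ List.replicate (b'+1) 0, (a:Int)) 1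
          = (List.replicate (a+1) 1 ++ List.replicate b' 0, ((a+1 : Nat) : Int)) := by
        simp [rstep, hset]
      rw [List.foldl_cons, step, ih (a+1) b' (by omega)]
      rw [show a + 1 + List.count 1 r = a + (List.count 1 r + 1) by omega,
          show b' - List.count 1 r = b' + 1 - (List.count 1 r + 1) by omega]
    · rw [List.count_cons_of_ne hx] at hc ⊢
      rw [List.foldl_cons, show rstep (List.replicate a (1:Int) ++ List.replicate b 0, (a:Int)) x
            = (List.replicate a 1 ++ List.replicate b 0, (a:Int)) from if_neg hx, ih a b hc]

-- The matrix-level inner loop only touches row i: it equals the row-level loop lifted by set.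
theorem hp_lift (row : List Int) (i : Nat) (js : List Int) :
    ∀ (proj : List (List Int)) (k : Int), i < proj.length →
    js.foldl (mstep row (i : Int)) (proj, k)
    = (proj.set i (js.foldl (jstep row) (proj.getD i [], k)).1,
       (js.foldl (jstep row) (proj.getD i [], k)).2) := by
  induction js with
  | nil =>
    intro proj k hi
    simp only [List.foldl_nil]
    rw [List.getD_eq_getElem proj [] hi, List.set_getElem_self hi]
  | cons j js ih =>
    intro proj k hi
    by_cases hg : PySem.List.pyGetD row j 0 = 1
    · have hm : mstep row (i:Int) (proj, k) j
          = (proj.set i (PySem.List.pySetD (proj.getD i []) k 1), k + 1) := by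
        simp [mstep, hg, PySem.List.pySetD_natCast, PySem.List.pyGetD_natCast]
      have hj : jstep row (proj.getD i [], k) j = (PySem.List.pySetD (proj.getD i []) k 1, k + 1) := by
        simp [jstep, hg]
      rw [List.foldl_cons, hm, ih _ _ (by simpa using hi), List.foldl_cons, hj]
      rw [List.set_set]
      congr 2 <;>
        rw [List.getD_eq_getElem _ [] (by simpa using hi),
            List.getElem_set_self (by simpa using hi)]
    · have hm : mstep row (i:Int) (proj, k) j = (proj, k) := if_neg hg
      have hj : jstep row (proj.getD i [], k) j = (proj.getD i [], k) := if_neg hg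
      rw [List.foldl_cons, hm, ih _ _ hi, List.foldl_cons, hj]

-- A's outer loop: starting from m zero rows, the first n iterations each rebuild their own row.
theorem hp_outer (M' : List (List Int)) (js : List Int) (z : List Int) (m : Nat) :
    ∀ n, n ≤ m →
    (List.range n).foldl
      (fun proj (iN : Nat) => (js.foldl (mstep (PySem.List.pyGetD M' (iN:Int) []) (iN:Int)) (proj, 0)).1)
      (List.replicate m z)
    = (List.range n).map
        (fun (iN : Nat) => (js.foldl (jstep (PySem.List.pyGetD M' (iN:Int) [])) (z, 0)).1)
      ++ List.replicate (m - n) z := by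
  intro n
  induction n with
  | zero => intro _; simp
  | succ n ih =>
    intro hn
    rw [List.range_succ, List.foldl_append, List.foldl_cons, List.foldl_nil, ih (by omega)]
    set prev := (List.range n).map
        (fun (iN : Nat) => (js.foldl (jstep (PySem.List.pyGetD M' (iN:Int) [])) (z, 0)).1)
      ++ List.replicate (m - n) z with hprev
    have hlenmap : ((List.range n).map
        (fun (iN : Nat) => (js.foldl (jstep (PySem.List.pyGetD M' (iN:Int) [])) (z, 0)).1)).length = n := by
      simp
    have hlen : prev.length = m := by simp [hprev]; omega
    have hgd : prev.getD n [] = z := by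
      rw [hprev, List.getD_append_right _ _ [] n (by omega), hlenmap,
          List.getD_replicate z (by omega)]
    rw [hp_lift _ n js prev 0 (by omega), hgd]
    rw [hprev, List.set_append, if_neg (by omega)]
    rw [show m - n = (m - (n+1)) + 1 by omega, List.replicate_succ, hlenmap]
    simp only [Nat.sub_self, List.set_cons_zero]
    simp

-- B's row builder, written with List.replicate and List.take.
theorem hp_brow (row : List Int) (w : Nat) :
    PySem.List.pyRepeat [(1:Int)] ((PySem.List.count (PySem.List.slice row none (some (w:Int))) 1 : Nat) : Int) ++
      PySem.List.pyRepeat [(0:Int)] ((w:Int) - ((PySem.List.count (PySem.List.slice row none (some (w:Int))) 1 : Nat) : Int))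
    = List.replicate (List.count 1 (row.take w)) 1 ++
        List.replicate (w - List.count 1 (row.take w)) 0 := by
  rw [PySem.List.slice_to_natCast, PySem.List.count_eq, PySem.List.pyRepeat_singleton,
      PySem.List.pyRepeat_singleton, Int.toNat_natCast, Int.toNat_sub]

-- Mapping g over positional lookups is mapping g over the list.
theorem hp_getD_map (l : List (List Int)) (g : List Int → List Int) :
    (List.range l.length).map (fun i => g (l.getD i [])) = l.map g := by
  apply List.ext_getElem
  · simp
  · intro i h1 h2
    simp only [List.getElem_map, List.getElem_range]
    rw [List.getD_eq_getElem l [] (by simpa using h2)]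

theorem hp_main (M : List (List Int)) (hne : M ≠ [])
    (hge : ∀ r ∈ M, (M.headD []).length ≤ r.length) :
    horizontalProjection M = horizontalProjection_alt M := by
  -- basics
  have hlen0 : 0 < M.length := List.length_pos_iff.mpr hne
  have h0 : PySem.List.pyGetD M 0 [] = M.headD [] := by
    rw [show (0:Int) = ((0:Nat):Int) from rfl, PySem.List.pyGetD_natCast]
    obtain ⟨r0, rest, rfl⟩ := List.exists_cons_of_ne_nil hne
    rfl
  have hz : (PySem.List.pyRange 0 ((M.headD []).length : Int) 1).map (fun _ => (0:Int))
      = List.replicate (M.headD []).length 0 := by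
    rw [PySem.List.pyRange_zero_nat]
    simp [Function.comp_def, List.map_const']
  have hbuild : ∀ (n : Nat) (z : List Int),
      (PySem.List.pyRange 0 (n:Int) 1).foldl (fun acc _ => acc ++ [z]) ([] : List (List Int))
      = List.replicate n z := by
    intro n z
    rw [PySem.List.foldl_append_singleton_eq_map (fun _ => z)]
    simp [List.map_const', PySem.List.length_pyRange_one]
  set cMn := (M.headD []).length with hcMn
  set Z : List Int := List.replicate cMn 0 with hZ
  set brow : List Int → List Int := fun row =>
      List.replicate (List.count 1 (row.take cMn)) 1 ++
        List.replicate (cMn - List.count 1 (row.take cMn)) 0 with hbrow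
  -- B side
  have hB : horizontalProjection_alt M = M.map brow := by
    simp only [horizontalProjection_alt]
    rw [h0, ← hcMn]
    rw [PySem.List.foldl_append_singleton_eq_map
          (fun row => PySem.List.pyRepeat [(1:Int)]
              ((PySem.List.count (PySem.List.slice row none (some (cMn:Int))) 1 : Nat) : Int) ++
            PySem.List.pyRepeat [(0:Int)] ((cMn:Int) -
              ((PySem.List.count (PySem.List.slice row none (some (cMn:Int))) 1 : Nat) : Int))) M []]
    simp only [List.nil_append]
    refine List.map_congr_left (fun row _ => ?_)
    rw [hp_brow row cMn, hbrow]
  -- per-row computation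
  have hrowi : ∀ i ∈ List.range M.length,
      ((PySem.List.pyRange 0 (cMn : Int) 1).foldl
          (jstep (PySem.List.pyGetD M (i : Int) [])) (Z, 0)).1
      = brow (M.getD i []) := by
    intro i hi
    rw [List.mem_range] at hi
    rw [PySem.List.pyGetD_natCast M i []]
    set row := M.getD i [] with hrow
    have hmem : row ∈ M := by
      rw [hrow, List.getD_eq_getElem M [] hi]; exact List.getElem_mem hi
    have hrl : cMn ≤ row.length := hge row hmem
    set row' := row.take cMn with hrow'
    have hlen' : row'.length = cMn := by
      rw [hrow', List.length_take]; omega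
    have hcle : List.count 1 row' ≤ cMn := hlen' ▸ List.count_le_length
    -- on indices 0 ≤ j < cMn, scanning row is scanning its cMn-prefix
    have hjj : ∀ (acc : List Int × Int), ∀ j ∈ PySem.List.pyRange 0 (cMn : Int) 1,
        jstep row acc j = jstep row' acc j := by
      intro acc j hj
      rw [PySem.List.mem_pyRange_one] at hj
      have hj1 : j < (row.length : Int) := lt_of_lt_of_le hj.2 (by exact_mod_cast hrl)
      have hj2 : j < (row'.length : Int) := by rw [hlen']; exact hj.2
      unfold jstep
      rw [PySem.List.pyGetD_eq_getElem row 0 hj.1 hj1,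
          PySem.List.pyGetD_eq_getElem row' 0 hj.1 hj2]
      simp [hrow', List.getElem_take]
    rw [PySem.List.foldl_congr_mem _ _ _ _ hjj]
    have hjr : jstep row' = fun acc j => rstep acc (PySem.List.pyGetD row' j 0) := rfl
    rw [hjr, ← hlen', PySem.List.foldl_pyRange_zero_pyGetD' row' 0 rstep (Z, 0)]
    have hinner := hp_inner row' 0 cMn hcle
    simp only [List.replicate_zero, List.nil_append, Nat.cast_zero, Nat.zero_add] at hinner
    rw [hZ, hinner]
  -- assemble A
  simp only [horizontalProjection]
  rw [h0, hz, ← hcMn]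
  simp only [PySem.List.slice_none_none]
  rw [hbuild M.length Z, PySem.List.pyRange_zero_nat M.length, List.foldl_map]
  have houter := hp_outer M (PySem.List.pyRange 0 (cMn : Int) 1) Z M.length M.length le_rfl
  unfold mstep jstep at houter
  rw [houter]
  simp only [Nat.sub_self, List.replicate_zero, List.append_nil]
  rw [hB]
  have hmc := List.map_congr_left hrowi
  unfold jstep at hmc
  rw [hmc, hp_getD_map M brow]

-- ===== VERDICT (by name: the statement is the Claim_ definition above) =====
theorem horizontalProjection_spec : Claim_equal_horizontalProjection := by
  intro M _ hPre
  unfold Spec_horizontalProjection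
  exact hp_main M hPre.1 hPre.2
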